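-- pv_equiv track=rewrite | github.com/andre-cavalheiro/datascience-project | src/analysis.py | count_type_vars
-- ===== SOURCE A (Python) =====
-- def count_type_vars(dtypes):
-- 	count = { }
-- 	for el in dtypes:
-- 		if el in count:
-- 			count[el] += 1
-- 		else:
-- 			count[el] = 1
-- 	return count
-- ===== SOURCE B (Python) =====
-- def count_type_vars(dtypes):
--     dtypes = list(dtypes)
--     distinct = list(dict.fromkeys(dtypes))
--     return {d: dtypes.count(d) for d in distinct}
-- ===== Notes on version B (the rewrite author's own statement) =====
-- stated objective: alternative
-- what changed: B replaces A's single accumulating dict pass with a distinct-values pass (ordered dedup) followed by a rescan counting each distinct value, built as a dict comprehension.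
import Mathlib
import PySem

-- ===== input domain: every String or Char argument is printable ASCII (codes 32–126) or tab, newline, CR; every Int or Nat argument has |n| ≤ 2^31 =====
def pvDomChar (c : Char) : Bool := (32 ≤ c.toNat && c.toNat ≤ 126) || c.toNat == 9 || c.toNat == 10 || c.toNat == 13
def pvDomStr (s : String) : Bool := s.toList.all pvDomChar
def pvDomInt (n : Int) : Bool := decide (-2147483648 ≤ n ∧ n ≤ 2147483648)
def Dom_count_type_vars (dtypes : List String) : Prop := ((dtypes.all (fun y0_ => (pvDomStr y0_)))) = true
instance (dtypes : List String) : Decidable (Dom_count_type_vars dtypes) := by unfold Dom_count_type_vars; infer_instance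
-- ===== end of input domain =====

-- B counts dtype occurrences by collecting distinct values first and rescanning per value (alternative decomposition, same results).


-- ===== PORT A =====
def count_type_vars (dtypes : List String) : List (String × Int) :=
  (dtypes.foldl (fun count el =>
      if count.contains el then count.insert el (count.getD el 0 + 1)
      else count.insert el 1)
    PySem.Dict.empty).items

-- ===== PORT B =====
-- B: distinct values first (ordered dedup = dict.fromkeys), then count each by rescanning
def count_type_vars_alt (dtypes : List String) : List (String × Int) :=
  (PySem.List.dedup dtypes).map (fun d => (d, (dtypes.count d : Int)))

-- ===== PRECONDITION & SPEC =====
def Spec_count_type_vars (dtypes : List String) (out : List (String × Int)) : Prop := out = count_type_vars_alt dtypes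
instance (dtypes : List String) (out : List (String × Int)) : Decidable (Spec_count_type_vars dtypes out) := by unfold Spec_count_type_vars; infer_instance

-- ===== CLAIM (what is proved, stated in full; the proofs are below) =====
def Claim_equal_count_type_vars : Prop := ∀ (dtypes : List String), Dom_count_type_vars dtypes → Spec_count_type_vars dtypes (count_type_vars dtypes)

-- ===== LEMMAS AND PROOFS =====

-- ===== VERDICT (by name: the statement is the Claim_ definition above) =====
theorem step_eq (d : PySem.Dict String Int) (el : String) :
    (if d.contains el then d.insert el (d.getD el 0 + 1) else d.insert el 1)
    = d.insert el (d.getD el 0 + 1) := by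
  by_cases h : d.contains el = true
  · simp [h]
  · simp only [Bool.not_eq_true] at h
    rw [PySem.Dict.getD_of_not_contains (h := h)]; simp [h]

theorem count_type_vars_spec : Claim_equal_count_type_vars := by
  intro dtypes _
  show count_type_vars dtypes = count_type_vars_alt dtypes
  unfold count_type_vars count_type_vars_alt
  simp only [step_eq]
  rw [PySem.Dict.foldl_insert_getD_add_one_eq_counter, PySem.Dict.items_counter]
  simp
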